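-- pv_equiv track=rewrite | github.com/vinayaksodar/cs-courses-notes | mit-6.006/code/dfs.py | dfs
-- ===== SOURCE A (Python) =====
-- def dfs(adj, start, parent=None, distance=None):
--     if parent == None:
--         parent = {start: None}
--         distance = {start: 0}
--     for v in adj[start]:
--         if v not in parent:
--             parent[v] = start
--             distance[v] = distance[start] + 1
--             dfs(adj, v, parent, distance)
--
--     return parent, distance
-- ===== SOURCE B (Python) =====
-- def dfs(adj, start, parent=None, distance=None):
--     # Iterative DFS with an explicit stack of (node, neighbor-iterator) frames;
--     # reproduces the recursive preorder discovery order exactly.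
--     # Like A, it mutates supplied parent/distance dicts in place.
--     if parent == None:
--         parent = {start: None}
--         distance = {start: 0}
--     stack = [(start, iter(adj[start]))]
--     while stack:
--         u, it = stack[-1]
--         try:
--             v = next(it)
--         except StopIteration:
--             stack.pop()
--             continue
--         if v not in parent:
--             parent[v] = u
--             distance[v] = distance[u] + 1
--             stack.append((v, iter(adj[v])))
--     return parent, distance
-- ===== Notes on version B (the rewrite author's own statement) =====
-- stated objective: alternative
-- what changed: The recursion is replaced by an iterative DFS over an explicit stack of (node, neighbor-iterator) frames that reproduces the recursive discovery order exactly (and avoids Python's recursion limit on deep graphs).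
-- outside the precondition, e.g. on dfs({0: []}, 0, {0: None}, None): A returns ({0: None}, None), B returns ({0: None}, None)
import Mathlib
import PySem

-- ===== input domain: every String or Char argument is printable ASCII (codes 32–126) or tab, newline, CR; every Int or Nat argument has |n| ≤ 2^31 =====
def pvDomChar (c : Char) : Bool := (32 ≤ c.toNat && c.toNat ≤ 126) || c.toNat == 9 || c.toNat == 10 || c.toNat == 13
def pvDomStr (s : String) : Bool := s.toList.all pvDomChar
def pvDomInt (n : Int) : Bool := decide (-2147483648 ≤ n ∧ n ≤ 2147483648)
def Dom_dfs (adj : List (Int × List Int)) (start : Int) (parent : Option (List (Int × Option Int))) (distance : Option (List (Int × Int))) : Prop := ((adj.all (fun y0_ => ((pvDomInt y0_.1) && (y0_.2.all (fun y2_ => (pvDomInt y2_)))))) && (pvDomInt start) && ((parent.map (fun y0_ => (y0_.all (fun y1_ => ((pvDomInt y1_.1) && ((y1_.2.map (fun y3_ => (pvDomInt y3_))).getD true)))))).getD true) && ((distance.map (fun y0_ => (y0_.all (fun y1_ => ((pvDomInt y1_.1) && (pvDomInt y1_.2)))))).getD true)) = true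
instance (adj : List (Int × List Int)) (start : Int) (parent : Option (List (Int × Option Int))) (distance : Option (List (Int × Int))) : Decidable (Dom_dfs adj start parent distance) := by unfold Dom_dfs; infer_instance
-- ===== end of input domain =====

-- B replaces A's recursion by an iterative DFS over an explicit stack of (node, neighbor-iterator)
-- frames with the same discovery order; both versions mutate supplied parent/distance dicts in place
-- (the equivalence proved here is about the RETURN value).

-- ===== PORT A =====
-- Termination-measure helpers, cited by the ports' decreasing_by (fuel-free well-founded recursion):
-- pvUnv counts the adjacency keys not yet present in parent.
def pvUnv (ad : PySem.Dict Int (List Int)) (p : PySem.Dict Int (Option Int)) : Nat :=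
  ad.keys.countP (fun k => ! p.contains k)

theorem pvContains_insert_mono (p : PySem.Dict Int (Option Int)) (v : Int) (x : Option Int)
    (k : Int) (h : p.contains k = true) : (p.insert v x).contains k = true := by
  simp [PySem.Dict.contains_insert, h]

theorem pvUnv_mono (ad : PySem.Dict Int (List Int)) (p q : PySem.Dict Int (Option Int))
    (h : ∀ k, p.contains k = true → q.contains k = true) : pvUnv ad q ≤ pvUnv ad p := by
  apply List.countP_mono_left
  intro k _ hk
  simp only [Bool.not_eq_true'] at hk ⊢
  cases hp : p.contains k with
  | false => rfl
  | true => exact absurd (h k hp) (by simp [hk])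

theorem pvUnv_insert_le (ad : PySem.Dict Int (List Int)) (p : PySem.Dict Int (Option Int))
    (v : Int) (x : Option Int) : pvUnv ad (p.insert v x) ≤ pvUnv ad p :=
  pvUnv_mono ad p _ (fun k h => pvContains_insert_mono p v x k h)

theorem pvCountP_lt {α : Type} (pr q : α → Bool) (l : List α) (v : α) (hv : v ∈ l)
    (hpv : pr v = true) (hqv : q v = false) (himp : ∀ x, q x = true → pr x = true) :
    l.countP q < l.countP pr := by
  induction l with
  | nil => cases hv
  | cons a t ih =>
    rcases List.mem_cons.mp hv with rfl | hvt
    · simp only [List.countP_cons, hpv, hqv, if_true]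
      have : t.countP q ≤ t.countP pr := List.countP_mono_left (fun x _ => himp x)
      simp only [Bool.false_eq_true, if_false]
      omega
    · have := ih hvt
      simp only [List.countP_cons]
      have hq : (if q a = true then 1 else 0) ≤ (if pr a = true then 1 else 0) := by
        cases hqa : q a with
        | true => simp [himp a hqa]
        | false => simp
      omega

theorem pvUnv_insert_lt (ad : PySem.Dict Int (List Int)) (p : PySem.Dict Int (Option Int))
    (v : Int) (x : Option Int) (hmem : ad.contains v = true) (hnp : p.contains v = false) :
    pvUnv ad (p.insert v x) < pvUnv ad p := by
  apply pvCountP_lt _ _ _ v ((PySem.Dict.contains_iff_mem_keys ad v).mp hmem)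
  · simp [hnp]
  · simp
  · intro k hk
    simp only [Bool.not_eq_true'] at hk ⊢
    simp only [PySem.Dict.contains_insert, Bool.or_eq_false_iff] at hk
    exact hk.2

-- visitA ad u ns p d: A's `for v in adj[start]` loop body, recursion and all, over the dicts p, d;
-- the subtype records that visiting only adds keys to parent (needed for termination).
-- Where Python A raises (distance[u] or adj[v] missing) the port skips instead; those inputs are
-- excluded by Pre_dfs (and dfs_alt's port skips identically at the same program points).
def visitA (ad : PySem.Dict Int (List Int)) (u : Int) (ns : List Int)
    (p : PySem.Dict Int (Option Int)) (d : PySem.Dict Int Int) :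
    {r : PySem.Dict Int (Option Int) × PySem.Dict Int Int //
      ∀ k, p.contains k = true → r.1.contains k = true} :=
  match ns with
  | [] => ⟨(p, d), fun _ h => h⟩
  | v :: rest =>
    if hv : p.contains v = true then
      -- hv is needed by decreasing_by in the sibling branches
      visitA ad u rest p d
    else
      match d.get? u with
      | none => visitA ad u rest p d          -- Python: KeyError on distance[u]; outside Pre_dfs
      | some du =>
        match ha : ad.get? v with
        | none =>                              -- Python: KeyError on adj[v]; outside Pre_dfs
          let r := visitA ad u rest (p.insert v (some u)) (d.insert v (du + 1))
          ⟨r.1, fun k h => r.2 k (pvContains_insert_mono p v (some u) k h)⟩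
        | some nsv =>
          let r1 := visitA ad v nsv (p.insert v (some u)) (d.insert v (du + 1))
          let r2 := visitA ad u rest r1.1.1 r1.1.2
          ⟨r2.1, fun k h => r2.2 k (r1.2 k (pvContains_insert_mono p v (some u) k h))⟩
termination_by (pvUnv ad p, ns.length)
decreasing_by
  · exact Prod.Lex.right _ (by simp only [List.length_cons]; omega)
  · exact Prod.Lex.right _ (by simp only [List.length_cons]; omega)
  · rcases lt_or_eq_of_le (pvUnv_insert_le ad p v (some u)) with h | h
    · exact Prod.Lex.left _ _ h
    · rw [h]; exact Prod.Lex.right _ (by simp only [List.length_cons]; omega)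
  · refine Prod.Lex.left _ _ (pvUnv_insert_lt ad p v (some u) ?_ (by simpa using hv))
    rw [PySem.Dict.contains_eq_isSome_get?, ha]; rfl
  · refine Prod.Lex.left _ _ (lt_of_le_of_lt (pvUnv_mono ad _ _ r1.2) ?_)
    refine pvUnv_insert_lt ad p v (some u) ?_ (by simpa using hv)
    rw [PySem.Dict.contains_eq_isSome_get?, ha]; rfl

def dfs (adj : List (Int × List Int)) (start : Int) (parent : Option (List (Int × Option Int))) (distance : Option (List (Int × Int))) : (List (Int × Option Int)) × (List (Int × Int)) :=
  let ad := PySem.Dict.ofList adj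
  match parent with
  | none =>
    let p0 : PySem.Dict Int (Option Int) := PySem.Dict.ofList [(start, none)]
    let d0 : PySem.Dict Int Int := PySem.Dict.ofList [(start, 0)]
    match ad.get? start with
    | none => (p0.items, d0.items)             -- Python: KeyError on adj[start]; outside Pre_dfs
    | some ns => ((visitA ad start ns p0 d0).1.1.items, (visitA ad start ns p0 d0).1.2.items)
  | some pl =>
    let p0 := PySem.Dict.ofList pl
    match distance with
    | none => (p0.items, [])                   -- Python: distance is None, not a dict; outside Pre_dfs
    | some dl =>
      let d0 := PySem.Dict.ofList dl
      match ad.get? start with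
      | none => (p0.items, d0.items)           -- Python: KeyError on adj[start]; outside Pre_dfs
      | some ns => ((visitA ad start ns p0 d0).1.1.items, (visitA ad start ns p0 d0).1.2.items)

-- ===== PORT B =====
-- Stack-machine measure: total weight of the frames plus a bound on the weight of frames still to be pushed.
def pvFrameW (stack : List (Int × List Int)) : Nat := (stack.map (fun f => f.2.length + 1)).sum

def pvMaxLen (ad : PySem.Dict Int (List Int)) : Nat :=
  (ad.items.map (fun kv => kv.2.length)).foldr max 0

theorem pvLe_foldr_max (l : List Nat) (x : Nat) (h : x ∈ l) : x ≤ l.foldr max 0 := by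
  induction l with
  | nil => cases h
  | cons a t ih =>
    rcases List.mem_cons.mp h with rfl | ht
    · exact le_max_left _ _
    · exact le_trans (ih ht) (le_max_right _ _)

theorem pvLen_le_maxLen (ad : PySem.Dict Int (List Int)) (v : Int) (nsv : List Int)
    (h : ad.get? v = some nsv) : nsv.length ≤ pvMaxLen ad := by
  apply pvLe_foldr_max
  exact List.mem_map.mpr ⟨(v, nsv), PySem.Dict.mem_items_of_get?_eq_some ad h, rfl⟩

-- runB ad stack p d: B's while loop; the top frame (u, ns) holds the node u and what is left of its
-- neighbor iterator.  The two Python-raise points are skipped exactly as in visitA (outside Pre_dfs).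
def runB (ad : PySem.Dict Int (List Int)) (stack : List (Int × List Int))
    (p : PySem.Dict Int (Option Int)) (d : PySem.Dict Int Int) :
    (PySem.Dict Int (Option Int)) × (PySem.Dict Int Int) :=
  match stack with
  | [] => (p, d)
  | (u, ns) :: frames =>
    match ns with
    | [] => runB ad frames p d                                       -- StopIteration: pop
    | v :: rest =>
      if hv : p.contains v = true then runB ad ((u, rest) :: frames) p d
      else
        match d.get? u with
        | none => runB ad ((u, rest) :: frames) p d                  -- Python: KeyError; outside Pre_dfs
        | some du =>
          match ha : ad.get? v with
          | none =>                                                  -- Python: KeyError; outside Pre_dfs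
            runB ad ((u, rest) :: frames) (p.insert v (some u)) (d.insert v (du + 1))
          | some nsv =>
            runB ad ((v, nsv) :: (u, rest) :: frames) (p.insert v (some u)) (d.insert v (du + 1))
termination_by pvFrameW stack + (pvMaxLen ad + 2) * pvUnv ad p
decreasing_by
  · simp only [pvFrameW, List.map_cons, List.sum_cons, List.length_cons]
    generalize (pvMaxLen ad + 2) * pvUnv ad p = X
    omega
  · simp only [pvFrameW, List.map_cons, List.sum_cons, List.length_cons]
    generalize (pvMaxLen ad + 2) * pvUnv ad p = X
    omega
  · simp only [pvFrameW, List.map_cons, List.sum_cons, List.length_cons]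
    generalize (pvMaxLen ad + 2) * pvUnv ad p = X
    omega
  · have h1 := Nat.mul_le_mul_left (pvMaxLen ad + 2) (pvUnv_insert_le ad p v (some u))
    simp only [pvFrameW, List.map_cons, List.sum_cons, List.length_cons]
    generalize (pvMaxLen ad + 2) * pvUnv ad (p.insert v (some u)) = X at h1
    generalize (pvMaxLen ad + 2) * pvUnv ad p = Y at h1 ⊢
    omega
  · have hlt : pvUnv ad (p.insert v (some u)) < pvUnv ad p := by
      refine pvUnv_insert_lt ad p v (some u) ?_ (by simpa using hv)
      rw [PySem.Dict.contains_eq_isSome_get?, ha]; rfl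
    have h1 : (pvMaxLen ad + 2) * (pvUnv ad (p.insert v (some u)) + 1) ≤ (pvMaxLen ad + 2) * pvUnv ad p :=
      Nat.mul_le_mul_left _ (by omega)
    have h2 := pvLen_le_maxLen ad v nsv ha
    simp only [pvFrameW, List.map_cons, List.sum_cons, List.length_cons, Nat.mul_add, Nat.mul_one] at h1 ⊢
    generalize (pvMaxLen ad + 2) * pvUnv ad (p.insert v (some u)) = X at h1 ⊢
    generalize (pvMaxLen ad + 2) * pvUnv ad p = Y at h1 ⊢
    omega

def dfs_alt (adj : List (Int × List Int)) (start : Int) (parent : Option (List (Int × Option Int))) (distance : Option (List (Int × Int))) : (List (Int × Option Int)) × (List (Int × Int)) :=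
  let ad := PySem.Dict.ofList adj
  match parent with
  | none =>
    let p0 : PySem.Dict Int (Option Int) := PySem.Dict.ofList [(start, none)]
    let d0 : PySem.Dict Int Int := PySem.Dict.ofList [(start, 0)]
    match ad.get? start with
    | none => (p0.items, d0.items)             -- Python: KeyError on adj[start] at stack init; outside Pre_dfs
    | some ns => ((runB ad [(start, ns)] p0 d0).1.items, (runB ad [(start, ns)] p0 d0).2.items)
  | some pl =>
    let p0 := PySem.Dict.ofList pl
    match distance with
    | none => (p0.items, [])                   -- Python: distance is None, not a dict; outside Pre_dfs
    | some dl =>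
      let d0 := PySem.Dict.ofList dl
      match ad.get? start with
      | none => (p0.items, d0.items)
      | some ns => ((runB ad [(start, ns)] p0 d0).1.items, (runB ad [(start, ns)] p0 d0).2.items)

-- ===== PRECONDITION & SPEC =====
-- Pre_dfs excludes exactly the inputs on which Python A does not return a dict pair: KeyError on
-- adj[v] for a vertex v reached through not-yet-visited vertices, KeyError on distance[start] when a
-- first undiscovered neighbor of start exists but start has no distance entry, and the case
-- parent supplied with distance=None, where A returns (parent, None) — None is not a value of the
-- declared dict type (or raises a TypeError as soon as a vertex is discovered).
def pvP0 (start : Int) (parent : Option (List (Int × Option Int))) : PySem.Dict Int (Option Int) :=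
  match parent with
  | none => PySem.Dict.ofList [(start, none)]
  | some pl => PySem.Dict.ofList pl

-- pvReach: the set of vertices the DFS traverses (start, plus every vertex reachable from start by
-- edges leaving traversed vertices and not blocked by the initial parent map), as a bounded
-- monotone closure — order-independent, not a transcription of either port.
def pvReach (ad : PySem.Dict Int (List Int)) (start : Int) (p0 : PySem.Dict Int (Option Int)) : List Int :=
  (List.range (ad.items.length + 1)).foldl
    (fun t _ =>
      ad.items.foldl
        (fun t kv =>
          if t.contains kv.1 then
            kv.2.foldl (fun t v => if p0.contains v then t else PySem.Set.add t v) t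
          else t)
        t)
    (PySem.Set.ofList [start])

def pvDistOk (ad : PySem.Dict Int (List Int)) (start : Int) (parent : Option (List (Int × Option Int))) (distance : Option (List (Int × Int))) : Bool :=
  match parent, distance with
  | none, _ => true
  | some _, none => false
  | some _, some dl =>
      ((ad.get? start).getD []).all (fun v => (pvP0 start parent).contains v)
        || (PySem.Dict.ofList dl).contains start

def Pre_dfs (adj : List (Int × List Int)) (start : Int) (parent : Option (List (Int × Option Int))) (distance : Option (List (Int × Int))) : Prop :=
  (PySem.Dict.ofList adj).contains start = true ∧
  (∀ v ∈ pvReach (PySem.Dict.ofList adj) start (pvP0 start parent),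
      (PySem.Dict.ofList adj).contains v = true) ∧
  pvDistOk (PySem.Dict.ofList adj) start parent distance = true
instance (adj : List (Int × List Int)) (start : Int) (parent : Option (List (Int × Option Int))) (distance : Option (List (Int × Int))) : Decidable (Pre_dfs adj start parent distance) := by unfold Pre_dfs; infer_instance

def pvWitness_dfs : (List (Int × List Int)) × Int × (Option (List (Int × Option Int))) × (Option (List (Int × Int))) := ([(0, [1]), (1, [])], 0, none, none)

def Spec_dfs (adj : List (Int × List Int)) (start : Int) (parent : Option (List (Int × Option Int))) (distance : Option (List (Int × Int))) (out : (List (Int × Option Int)) × (List (Int × Int))) : Prop := out = dfs_alt adj start parent distance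
instance (adj : List (Int × List Int)) (start : Int) (parent : Option (List (Int × Option Int))) (distance : Option (List (Int × Int))) (out : (List (Int × Option Int)) × (List (Int × Int))) : Decidable (Spec_dfs adj start parent distance out) := by unfold Spec_dfs; infer_instance

-- ===== CLAIM (what is proved, stated in full; the proofs are below) =====
def Claim_equal_dfs : Prop := ∀ (adj : List (Int × List Int)) (start : Int) (parent : Option (List (Int × Option Int))) (distance : Option (List (Int × Int))), Dom_dfs adj start parent distance → Pre_dfs adj start parent distance → Spec_dfs adj start parent distance (dfs adj start parent distance)

-- ===== LEMMAS AND PROOFS =====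
-- One-step unfolding lemmas for runB's five branches (the WF equation lemmas are conditional).
theorem runB_nil (ad : PySem.Dict Int (List Int)) (p : PySem.Dict Int (Option Int))
    (d : PySem.Dict Int Int) : runB ad [] p d = (p, d) := by
  rw [runB.eq_def]

theorem runB_pop (ad : PySem.Dict Int (List Int)) (u : Int) (frames : List (Int × List Int))
    (p : PySem.Dict Int (Option Int)) (d : PySem.Dict Int Int) :
    runB ad ((u, []) :: frames) p d = runB ad frames p d := by
  rw [runB.eq_def]

theorem runB_visited (ad : PySem.Dict Int (List Int)) (u v : Int) (rest : List Int)
    (frames : List (Int × List Int)) (p : PySem.Dict Int (Option Int)) (d : PySem.Dict Int Int)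
    (hv : p.contains v = true) :
    runB ad ((u, v :: rest) :: frames) p d = runB ad ((u, rest) :: frames) p d := by
  rw [runB.eq_def]; simp [hv]

theorem runB_dnone (ad : PySem.Dict Int (List Int)) (u v : Int) (rest : List Int)
    (frames : List (Int × List Int)) (p : PySem.Dict Int (Option Int)) (d : PySem.Dict Int Int)
    (hv : p.contains v = false) (hd : d.get? u = none) :
    runB ad ((u, v :: rest) :: frames) p d = runB ad ((u, rest) :: frames) p d := by
  rw [runB.eq_def]; simp [hv, hd]

theorem runB_adjnone (ad : PySem.Dict Int (List Int)) (u v : Int) (rest : List Int)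
    (frames : List (Int × List Int)) (p : PySem.Dict Int (Option Int)) (d : PySem.Dict Int Int)
    (du : Int) (hv : p.contains v = false) (hd : d.get? u = some du) (ha : ad.get? v = none) :
    runB ad ((u, v :: rest) :: frames) p d
      = runB ad ((u, rest) :: frames) (p.insert v (some u)) (d.insert v (du + 1)) := by
  rw [runB.eq_def]; simp [hv, hd]; split <;> simp_all

theorem runB_push (ad : PySem.Dict Int (List Int)) (u v : Int) (rest : List Int)
    (frames : List (Int × List Int)) (p : PySem.Dict Int (Option Int)) (d : PySem.Dict Int Int)
    (du : Int) (nsv : List Int)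
    (hv : p.contains v = false) (hd : d.get? u = some du) (ha : ad.get? v = some nsv) :
    runB ad ((u, v :: rest) :: frames) p d
      = runB ad ((v, nsv) :: (u, rest) :: frames) (p.insert v (some u)) (d.insert v (du + 1)) := by
  rw [runB.eq_def]; simp [hv, hd]; split <;> simp_all

-- Key simulation lemma: running the stack machine with (u, ns) on top is running A's recursive visit
-- of (u, ns) and then the machine on the remaining frames (the ports agree on every input, so no
-- precondition is needed here).
theorem runB_eq_visitA (ad : PySem.Dict Int (List Int)) (u : Int) (ns : List Int)
    (p : PySem.Dict Int (Option Int)) (d : PySem.Dict Int Int) (frames : List (Int × List Int)) :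
    runB ad ((u, ns) :: frames) p d
      = runB ad frames (visitA ad u ns p d).1.1 (visitA ad u ns p d).1.2 := by
  fun_induction visitA ad u ns p d generalizing frames
  case case1 => rw [runB_pop]
  case case2 u p d v rest hv ih =>
    rw [runB_visited ad u v rest frames p d hv]
    exact ih frames
  case case3 u p d v rest hv hd ih =>
    rw [runB_dnone ad u v rest frames p d (by simpa using hv) hd]
    exact ih frames
  case case4 u p d v rest hv du hd ha r ih =>
    rw [runB_adjnone ad u v rest frames p d du (by simpa using hv) hd ha]
    exact ih frames
  case case5 u p d v rest hv du hd nsv ha r1 r2 ih3 ih2 ih1 =>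
    rw [runB_push ad u v rest frames p d du nsv (by simpa using hv) hd ha,
      ih3 ((u, rest) :: frames)]
    exact ih1 frames

theorem dfs_spec : Claim_equal_dfs := by
  intro adj start parent distance _ _
  unfold Spec_dfs dfs dfs_alt
  cases parent with
  | none =>
    cases h : (PySem.Dict.ofList adj).get? start with
    | none => simp only [h]
    | some ns => simp only [h, runB_eq_visitA, runB_nil]
  | some pl =>
    cases distance with
    | none => rfl
    | some dl =>
      cases h : (PySem.Dict.ofList adj).get? start with
      | none => simp only [h]
      | some ns => simp only [h, runB_eq_visitA, runB_nil]
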